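-- pv_equiv track=rewrite | github.com/pwmcclung/codeWars2 | bald.py | bald
-- ===== SOURCE A (Python) =====
-- def bald(s):
--     lst = [*s]
--     count = 0
--     newStr = len(s) * '-'
--     for x in lst:
--         if x == '/':
--             count += 1
--     if count == 0:
--         return [newStr,"Clean!"]
--     elif count == 1:
--         return [newStr,"Unicorn!"]
--     elif count == 2:
--         return [newStr,"Homer!"]
--     elif count >2 and count <6:
--         return [newStr,"Careless!"]
--     elif count >5:
--         return [newStr,"Hobo!"]
-- ===== SOURCE B (Python) =====
-- def bald(s):
--     # One fused pass with no counter and no branch cascade: carry the list of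
--     # remaining labels and consume its head on each slash, saturating at the last
--     # label; the dash string is accumulated in the same pass.
--     labels = ["Clean!", "Unicorn!", "Homer!", "Careless!", "Careless!", "Careless!", "Hobo!"]
--     dashes = []
--     for ch in s:
--         dashes.append('-')
--         if ch == '/' and len(labels) > 1:
--             labels.pop(0)
--     return [''.join(dashes), labels[0]]
-- ===== Notes on version B (the rewrite author's own statement) =====
-- stated objective: alternative
-- what changed: A counts slashes in one loop and then picks the label with a five-branch if/elif cascade; B makes a single fused pass that maintains no counter at all: it carries the list of remaining labels, consuming the head on each slash (saturating at the last label), and accumulates the dash string in the same pass.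
import Mathlib
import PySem

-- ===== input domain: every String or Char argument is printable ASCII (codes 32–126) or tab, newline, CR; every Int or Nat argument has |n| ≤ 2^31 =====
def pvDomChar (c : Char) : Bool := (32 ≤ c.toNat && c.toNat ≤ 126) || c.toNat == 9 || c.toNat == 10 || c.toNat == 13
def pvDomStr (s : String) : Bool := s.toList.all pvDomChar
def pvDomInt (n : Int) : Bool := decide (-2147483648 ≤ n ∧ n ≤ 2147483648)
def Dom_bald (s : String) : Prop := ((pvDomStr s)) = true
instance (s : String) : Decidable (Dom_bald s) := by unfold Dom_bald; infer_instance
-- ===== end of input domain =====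

-- B changes the structure (label-list state machine in one fused pass, no counter, no cascade); same cost.

-- ===== PORT A =====
-- literal port: list of chars, counting loop, len(s)*'-', then the if/elif cascade
def bald (s : String) : List String :=
  let lst := s.toList
  let count : Nat := lst.foldl (fun c x => if x = '/' then c + 1 else c) 0
  let newStr : String := String.ofList (List.replicate lst.length '-')
  if count = 0 then [newStr, "Clean!"]
  else if count = 1 then [newStr, "Unicorn!"]
  else if count = 2 then [newStr, "Homer!"]
  else if count > 2 ∧ count < 6 then [newStr, "Careless!"]
  else if count > 5 then [newStr, "Hobo!"]
  else []  -- Python would return None here; unreachable since count : Nat covers all cases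

-- ===== PORT B =====
def baldAltLabels : List String :=
  ["Clean!", "Unicorn!", "Homer!", "Careless!", "Careless!", "Careless!", "Hobo!"]

def baldAltStep (st : List Char × List String) (ch : Char) : List Char × List String :=
  let dashes := st.1 ++ ['-']
  let labels := if ch = '/' ∧ st.2.length > 1 then st.2.tail else st.2
  (dashes, labels)

def bald_alt (s : String) : List String :=
  let r := s.toList.foldl baldAltStep ([], baldAltLabels)
  [String.ofList r.1, r.2.headD ""]

-- ===== PRECONDITION & SPEC =====
def Spec_bald (s : String) (out : List String) : Prop := out = bald_alt s
instance (s : String) (out : List String) : Decidable (Spec_bald s out) := by unfold Spec_bald; infer_instance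

-- ===== CLAIM (what is proved, stated in full; the proofs are below) =====
def Claim_equal_bald : Prop := ∀ (s : String), Dom_bald s → Spec_bald s (bald s)

-- ===== LEMMAS AND PROOFS =====

-- the counting loop of A counts '/' occurrences
theorem bald_count_eq (l : List Char) (a : Nat) :
    l.foldl (fun c x => if x = '/' then c + 1 else c) a = a + l.count '/' := by
  induction l generalizing a with
  | nil => simp
  | cons x t ih =>
    simp only [List.foldl_cons, List.count_cons, ih]
    by_cases h : x = '/' <;> simp [h] <;> omega

-- B's fused fold, characterised: dashes accumulate and the labels shrink by min (count) 6
theorem bald_alt_fold (l : List Char) (d : List Char) (n : Nat) (hn : n ≤ 6) :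
    l.foldl baldAltStep (d, baldAltLabels.drop n)
      = (d ++ List.replicate l.length '-', baldAltLabels.drop (min (n + l.count '/') 6)) := by
  induction l generalizing d n with
  | nil => simp [Nat.min_eq_left hn]
  | cons x t ih =>
    simp only [List.foldl_cons, baldAltStep]
    have hlen : (baldAltLabels.drop n).length = 7 - n := by
      simp [baldAltLabels]
    by_cases hx : x = '/'
    · by_cases h6 : n < 6
      · have htail : (baldAltLabels.drop n).tail = baldAltLabels.drop (n + 1) := by
          rw [List.tail_drop]
        rw [if_pos ⟨hx, by rw [hlen]; omega⟩, htail, ih _ _ (by omega)]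
        simp only [hx, List.count_cons, List.replicate_succ, if_pos rfl, Prod.mk.injEq]
        constructor
        · simp [List.replicate_succ]
        · congr 1
          simp
          omega
      · have hn6 : n = 6 := by omega
        rw [if_neg (by subst hn6; simp [hlen]), ih _ _ hn]
        simp only [hx, List.count_cons, List.replicate_succ, if_pos rfl, Prod.mk.injEq]
        constructor
        · simp [List.replicate_succ]
        · congr 1
          simp
          omega
    · rw [if_neg (by simp [hx]), ih _ _ hn]
      simp only [hx, List.count_cons, List.replicate_succ, Prod.mk.injEq]
      constructor
      · simp [List.replicate_succ]
      · simp [hx]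

-- ===== VERDICT (by name: the statement is the Claim_ definition above) =====
theorem bald_spec : Claim_equal_bald := by
  intro s _
  unfold Spec_bald bald bald_alt
  have hfold := bald_alt_fold s.toList [] 0 (by omega)
  simp only [Nat.zero_add, List.drop_zero] at hfold
  rw [hfold]
  simp only [bald_count_eq, Nat.zero_add, List.nil_append]
  set c := s.toList.count '/' with hc
  rcases Nat.lt_or_ge c 6 with h | h
  · interval_cases c <;> simp [baldAltLabels]
  · have : min c 6 = 6 := by omega
    rw [this]
    have h0 : ¬ (c = 0) := by omega
    have h1 : ¬ (c = 1) := by omega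
    have h2 : ¬ (c = 2) := by omega
    have h6 : ¬ (c > 2 ∧ c < 6) := by omega
    have h5 : c > 5 := by omega
    simp [h0, h1, h2, h6, h5, baldAltLabels]
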